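-- pv_equiv track=rewrite | github.com/konstantyg/aoc | 2025/01/solution.py | part2
-- ===== SOURCE A (Python) =====
-- def part2(data: list[int]) -> int:
--     c: int = 0
--     s: int = 50
--     for v in data:
--         prev0: bool = s == 0
--         s += v
--         if s == 0:
--             c += 1
--         elif s >= 100:
--             c += s // 100
--         elif s < 0:
--             c += s // -100
--             if not prev0:
--                 c += 1
--         s %= 100
--
--     return c
-- ===== SOURCE B (Python) =====
-- def part2(data: list[int]) -> int:
--     # Track the unbounded running total and count crossings by floor arithmetic.
--     c = 0
--     u = 50
--     for v in data:
--         nu = u + v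
--         lo, hi = (u, nu) if u <= nu else (nu, u)
--         if hi > lo:
--             c += (hi - 1) // 100 - lo // 100
--         if nu % 100 == 0:
--             c += 1
--         u = nu
--     return c
-- ===== Notes on version B (the rewrite author's own statement) =====
-- stated objective: alternative
-- what changed: B keeps the unbounded running total and counts crossed multiples of 100 with floor-division arithmetic ((hi-1)//100 - lo//100 plus an exact-landing check), instead of A's four-way branch on the mod-100 remainder state.
import Mathlib
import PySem

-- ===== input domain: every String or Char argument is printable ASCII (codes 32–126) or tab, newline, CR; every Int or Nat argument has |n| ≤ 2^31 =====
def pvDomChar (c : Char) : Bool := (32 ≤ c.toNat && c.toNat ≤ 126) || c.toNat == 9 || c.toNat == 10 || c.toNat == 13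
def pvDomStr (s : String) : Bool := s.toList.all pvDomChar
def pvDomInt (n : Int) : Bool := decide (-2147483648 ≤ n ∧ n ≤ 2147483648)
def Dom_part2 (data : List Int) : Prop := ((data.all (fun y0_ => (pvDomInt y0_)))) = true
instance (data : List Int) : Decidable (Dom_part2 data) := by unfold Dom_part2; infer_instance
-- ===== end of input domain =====

-- B tracks the unbounded running total and counts boundary crossings with floor
-- arithmetic, replacing A's four-way branch on the mod-100 remainder (objective: alternative).

-- ===== PORT A =====
-- loop body of A: state (c, s), s the mod-100 remainder
def part2Step (st : Int × Int) (v : Int) : Int × Int :=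
  let c := st.1
  let s := st.2
  let prev0 : Bool := s == 0
  let s := s + v
  let c :=
    if s = 0 then c + 1
    else if 100 ≤ s then c + PySem.Int.floordiv s 100
    else if s < 0 then
      let c := c + PySem.Int.floordiv s (-100)
      if !prev0 then c + 1 else c
    else c
  (c, PySem.Int.mod s 100)

def part2 (data : List Int) : Int :=
  (data.foldl part2Step (0, 50)).1

-- ===== PORT B =====
-- loop body of B: state (c, u), u the unbounded running total
def part2AltStep (st : Int × Int) (v : Int) : Int × Int :=
  let c := st.1
  let u := st.2
  let nu := u + v
  let p := if u ≤ nu then (u, nu) else (nu, u)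
  let lo := p.1
  let hi := p.2
  let c := if lo < hi then c + (PySem.Int.floordiv (hi - 1) 100 - PySem.Int.floordiv lo 100) else c
  let c := if PySem.Int.mod nu 100 = 0 then c + 1 else c
  (c, nu)

def part2_alt (data : List Int) : Int :=
  (data.foldl part2AltStep (0, 50)).1

-- ===== PRECONDITION & SPEC =====
def Spec_part2 (data : List Int) (out : Int) : Prop := out = part2_alt data
instance (data : List Int) (out : Int) : Decidable (Spec_part2 data out) := by unfold Spec_part2; infer_instance

-- ===== CLAIM (what is proved, stated in full; the proofs are below) =====
def Claim_equal_part2 : Prop := ∀ (data : List Int), Dom_part2 data → Spec_part2 data (part2 data)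

-- ===== LEMMAS AND PROOFS =====

-- one loop step: A's state is B's total reduced mod 100, and the counters stay equal
set_option maxHeartbeats 1000000 in
theorem part2_step_agree (c u : Int) (v : Int) :
    part2Step (c, PySem.Int.mod u 100) v
      = ((part2AltStep (c, u) v).1, PySem.Int.mod (part2AltStep (c, u) v).2 100) := by
  have h100 : (0:Int) < 100 := by norm_num
  have hchar := PySem.Int.floordiv_mul_add_mod (PySem.Int.mod u 100 + v) (-100)
  have hbnd : (-100:Int) < PySem.Int.mod (PySem.Int.mod u 100 + v) (-100) ∧
      PySem.Int.mod (PySem.Int.mod u 100 + v) (-100) ≤ 0 :=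
    PySem.Int.mod_neg_bounds _ (by norm_num)
  simp only [PySem.Int.mod_eq_emod_of_pos h100] at hchar hbnd
  simp only [part2Step, part2AltStep, PySem.Int.mod_eq_emod_of_pos h100,
    PySem.Int.floordiv_eq_ediv_of_pos h100]
  split_ifs <;>
    simp only [Prod.mk.injEq, Bool.not_eq_true', beq_eq_false_iff_ne, true_and] at * <;>
    omega

-- the invariant carried through the fold
theorem part2_fold_agree (data : List Int) :
    ∀ c u : Int,
      (data.foldl part2Step (c, PySem.Int.mod u 100)).1 = (data.foldl part2AltStep (c, u)).1 := by
  induction data with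
  | nil => intro c u; rfl
  | cons v rest ih =>
      intro c u
      have h := part2_step_agree c u v
      simp only [List.foldl_cons, h]
      exact ih (part2AltStep (c, u) v).1 (part2AltStep (c, u) v).2

-- ===== VERDICT (by name: the statement is the Claim_ definition above) =====
theorem part2_spec : Claim_equal_part2 := by
  intro data _
  show part2 data = part2_alt data
  have h50 : PySem.Int.mod (50:Int) 100 = 50 := by decide
  unfold part2 part2_alt
  rw [← h50]
  exact part2_fold_agree data 0 50
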